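-- pv_equiv track=rewrite | github.com/marstepanyan/CountdownLabProject | numbers.py | ten_segment_num
-- ===== SOURCE A (Python) =====
-- def ten_segment_num(number):
--     rows = [''] * 3
--
--     for i, digit in enumerate(number):
--         if digit == '0':
--             rows[0] += ' __ '
--             rows[1] += '|  |'
--             rows[2] += '|__|'
--         elif digit == '1':
--             rows[0] += '    '
--             rows[1] += '   |'
--             rows[2] += '   |'
--         elif digit == '2':
--             rows[0] += ' __ '
--             rows[1] += ' __|'
--             rows[2] += '|__ '
--         elif digit == '3':
--             rows[0] += ' __ '
--             rows[1] += ' __|'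
--             rows[2] += ' __|'
--         elif digit == '4':
--             rows[0] += '    '
--             rows[1] += '|__|'
--             rows[2] += '   |'
--         elif digit == '5':
--             rows[0] += ' __ '
--             rows[1] += '|__ '
--             rows[2] += ' __|'
--         elif digit == '6':
--             rows[0] += ' __ '
--             rows[1] += '|__ '
--             rows[2] += '|__|'
--         elif digit == '7':
--             rows[0] += ' __ '
--             rows[1] += '   |'
--             rows[2] += '   |'
--         elif digit == '8':
--             rows[0] += ' __ '
--             rows[1] += '|__|'
--             rows[2] += '|__|'
--         elif digit == '9':
--             rows[0] += ' __ '
--             rows[1] += '|__|'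
--             rows[2] += ' __|'
--
--     return '\n'.join(rows)
-- ===== SOURCE B (Python) =====
-- # Seven-segment bitmasks: each digit is a 7-bit mask (a=1,b=2,c=4,d=8,e=16,f=32,g=64);
-- # every cell character is computed from the segment bits instead of stored as literal strings.
-- _MASK = {'0': 0x3F, '1': 0x06, '2': 0x5B, '3': 0x4F, '4': 0x66,
--          '5': 0x6D, '6': 0x7D, '7': 0x07, '8': 0x7F, '9': 0x6F}
--
--
-- def ten_segment_num(number):
--     masks = [_MASK[d] for d in number if d in _MASK]
--     top = ''.join(' __ ' if m & 1 else '    ' for m in masks)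
--     mid = ''.join(('|' if m & 32 else ' ') + ('__' if m & 64 else '  ')
--                   + ('|' if m & 2 else ' ') for m in masks)
--     bot = ''.join(('|' if m & 16 else ' ') + ('__' if m & 8 else '  ')
--                   + ('|' if m & 4 else ' ') for m in masks)
--     return '\n'.join([top, mid, bot])
-- ===== Notes on version B (the rewrite author's own statement) =====
-- stated objective: alternative
-- what changed: Replaces the if/elif chain of literal glyph strings built into three lockstep string-concatenation accumulators by a seven-segment bitmask encoding: each digit maps to a 7-bit mask, every output cell character is computed from individual segment bits, and the three rows are rendered in separate join passes.
import Mathlib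
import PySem

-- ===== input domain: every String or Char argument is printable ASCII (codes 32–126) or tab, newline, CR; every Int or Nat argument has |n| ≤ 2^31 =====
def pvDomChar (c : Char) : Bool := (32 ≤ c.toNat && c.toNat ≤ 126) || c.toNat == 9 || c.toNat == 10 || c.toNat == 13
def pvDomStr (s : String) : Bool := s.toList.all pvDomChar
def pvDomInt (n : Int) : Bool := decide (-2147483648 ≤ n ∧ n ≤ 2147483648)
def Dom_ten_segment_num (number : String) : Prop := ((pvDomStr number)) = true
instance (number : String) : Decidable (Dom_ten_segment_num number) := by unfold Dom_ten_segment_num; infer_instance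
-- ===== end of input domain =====

-- B replaces A's if/elif chain of literal glyph strings by a seven-segment bitmask
-- encoding: cells are computed from segment bits, rows rendered in separate passes
-- (objective: alternative).

-- ===== PORT A =====
-- one iteration of A's loop: the if/elif chain appending to the three rows
def tenStepA (rows : List Char × List Char × List Char) (digit : Char) :
    List Char × List Char × List Char :=
  if digit = '0' then (rows.1 ++ " __ ".toList, rows.2.1 ++ "|  |".toList, rows.2.2 ++ "|__|".toList)
  else if digit = '1' then (rows.1 ++ "    ".toList, rows.2.1 ++ "   |".toList, rows.2.2 ++ "   |".toList)
  else if digit = '2' then (rows.1 ++ " __ ".toList, rows.2.1 ++ " __|".toList, rows.2.2 ++ "|__ ".toList)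
  else if digit = '3' then (rows.1 ++ " __ ".toList, rows.2.1 ++ " __|".toList, rows.2.2 ++ " __|".toList)
  else if digit = '4' then (rows.1 ++ "    ".toList, rows.2.1 ++ "|__|".toList, rows.2.2 ++ "   |".toList)
  else if digit = '5' then (rows.1 ++ " __ ".toList, rows.2.1 ++ "|__ ".toList, rows.2.2 ++ " __|".toList)
  else if digit = '6' then (rows.1 ++ " __ ".toList, rows.2.1 ++ "|__ ".toList, rows.2.2 ++ "|__|".toList)
  else if digit = '7' then (rows.1 ++ " __ ".toList, rows.2.1 ++ "   |".toList, rows.2.2 ++ "   |".toList)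
  else if digit = '8' then (rows.1 ++ " __ ".toList, rows.2.1 ++ "|__|".toList, rows.2.2 ++ "|__|".toList)
  else if digit = '9' then (rows.1 ++ " __ ".toList, rows.2.1 ++ "|__|".toList, rows.2.2 ++ " __|".toList)
  else rows

def ten_segment_num (number : String) : String :=
  let rows := number.toList.foldl tenStepA ([], [], [])
  String.ofList (PySem.Chars.join ['\n'] [rows.1, rows.2.1, rows.2.2])

-- ===== PORT B =====
-- the _MASK table: digit → its 7-bit segment mask (a=1,b=2,c=4,d=8,e=16,f=32,g=64)
def segMask (c : Char) : Option Nat :=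
  if c = '0' then some 0x3F
  else if c = '1' then some 0x06
  else if c = '2' then some 0x5B
  else if c = '3' then some 0x4F
  else if c = '4' then some 0x66
  else if c = '5' then some 0x6D
  else if c = '6' then some 0x7D
  else if c = '7' then some 0x07
  else if c = '8' then some 0x7F
  else if c = '9' then some 0x6F
  else none

-- the three cell renderers, each computed from the segment bits
def cellTop (m : Nat) : List Char :=
  if m &&& 1 ≠ 0 then " __ ".toList else "    ".toList
def cellMid (m : Nat) : List Char :=
  (if m &&& 32 ≠ 0 then ['|'] else [' ']) ++ (if m &&& 64 ≠ 0 then ['_','_'] else [' ',' '])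
    ++ (if m &&& 2 ≠ 0 then ['|'] else [' '])
def cellBot (m : Nat) : List Char :=
  (if m &&& 16 ≠ 0 then ['|'] else [' ']) ++ (if m &&& 8 ≠ 0 then ['_','_'] else [' ',' '])
    ++ (if m &&& 4 ≠ 0 then ['|'] else [' '])

def ten_segment_num_alt (number : String) : String :=
  let masks := number.toList.filterMap segMask
  String.ofList (PySem.Chars.join ['\n']
    [masks.flatMap cellTop, masks.flatMap cellMid, masks.flatMap cellBot])

-- ===== PRECONDITION & SPEC =====
def Spec_ten_segment_num (number : String) (out : String) : Prop := out = ten_segment_num_alt number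
instance (number : String) (out : String) : Decidable (Spec_ten_segment_num number out) := by unfold Spec_ten_segment_num; infer_instance

-- ===== CLAIM (what is proved, stated in full; the proofs are below) =====
def Claim_equal_ten_segment_num : Prop := ∀ (number : String), Dom_ten_segment_num number → Spec_ten_segment_num number (ten_segment_num number)

-- ===== LEMMAS AND PROOFS =====

-- A's if/elif step, expressed through B's mask table and cell renderers
set_option maxHeartbeats 1000000 in
theorem tenStepA_eq_mask (rows : List Char × List Char × List Char) (d : Char) :
    tenStepA rows d = match segMask d with
      | some m => (rows.1 ++ cellTop m, rows.2.1 ++ cellMid m, rows.2.2 ++ cellBot m)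
      | none => rows := by
  simp only [tenStepA, segMask]
  split_ifs <;> simp [cellTop, cellMid, cellBot]

-- loop invariant: A's fold result is the accumulators followed by B's rendered rows
theorem tenLoop (l : List Char) (a b c : List Char) :
    l.foldl tenStepA (a, b, c) =
      (a ++ (l.filterMap segMask).flatMap cellTop,
       b ++ (l.filterMap segMask).flatMap cellMid,
       c ++ (l.filterMap segMask).flatMap cellBot) := by
  induction l generalizing a b c with
  | nil => simp
  | cons d t ih =>
    simp only [List.foldl_cons, tenStepA_eq_mask]
    cases h : segMask d with
    | none => simp [h, ih]
    | some m => simp [h, ih, List.append_assoc]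

-- ===== VERDICT (by name: the statement is the Claim_ definition above) =====
theorem ten_segment_num_spec : Claim_equal_ten_segment_num := by
  intro number _
  unfold Spec_ten_segment_num ten_segment_num ten_segment_num_alt
  rw [tenLoop]
  simp
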